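-- pv_equiv track=rewrite | github.com/huynonstop/grinding-leetcode | leetcode/countSubIslands.py | count
-- ===== SOURCE A (Python) =====
-- def count(grid1, grid2):
--     r = len(grid1)
--     c = len(grid1[0])
--
--     def dfs_2(i, j):
--         if not (0 <= i < r and 0 <= j < c and grid2[i][j] == 1):
--             return True
--
--         grid2[i][j] = 0
--         res = grid1[i][j] == 1
--         for di, dj in [[0, 1], [1, 0], [-1, 0], [0, -1]]:
--             res &= dfs(i + di, j + dj)
--         return res
--
--     def dfs(i, j):
--         if grid2[i][j] == 1:
--             grid2[i][j] = 0
--             top = bot = right = left = True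
--             if i >= 1:
--                 top = dfs(i - 1, j)
--             if i <= r - 2:
--                 bot = dfs(i + 1, j)
--             if j >= 1:
--                 left = dfs(i, j - 1)
--             if j <= c - 2:
--                 right = dfs(i, j + 1)
--             return grid1[i][j] == 1 and top and bot and left and right
--         return True
--
--     count = 0
--     for i in range(r):
--         for j in range(c):
--             if grid2[i][j] == 1:
--                 count += dfs(i, j)
--     return count
-- ===== SOURCE B (Python) =====
-- # B: same mutation of grid2 as A (zeroes every visited island cell); iterative
-- # stack-based flood fill instead of A's recursion.
-- def count(grid1, grid2):
--     r, c = len(grid1), len(grid1[0])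
--     total = 0
--     for i in range(r):
--         for j in range(c):
--             if grid2[i][j] == 1:
--                 ok = True
--                 stack = [(i, j)]
--                 while stack:
--                     x, y = stack.pop()
--                     if 0 <= x < r and 0 <= y < c and grid2[x][y] == 1:
--                         grid2[x][y] = 0
--                         ok = ok and grid1[x][y] == 1
--                         stack.append((x, y + 1))
--                         stack.append((x, y - 1))
--                         stack.append((x + 1, y))
--                         stack.append((x - 1, y))
--                 total += ok
--     return total
-- ===== Notes on version B (the rewrite author's own statement) =====
-- stated objective: idiomatic
-- what changed: Replaced A's recursive DFS (with four guarded recursive calls and a dead helper dfs_2) by an explicit stack-based flood fill that pops a cell, zeroes it, ANDs a running all-land flag, and pushes its four neighbours, checking bounds at pop time; the whole component is still drained so grid2 ends up mutated identically.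
import Mathlib
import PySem

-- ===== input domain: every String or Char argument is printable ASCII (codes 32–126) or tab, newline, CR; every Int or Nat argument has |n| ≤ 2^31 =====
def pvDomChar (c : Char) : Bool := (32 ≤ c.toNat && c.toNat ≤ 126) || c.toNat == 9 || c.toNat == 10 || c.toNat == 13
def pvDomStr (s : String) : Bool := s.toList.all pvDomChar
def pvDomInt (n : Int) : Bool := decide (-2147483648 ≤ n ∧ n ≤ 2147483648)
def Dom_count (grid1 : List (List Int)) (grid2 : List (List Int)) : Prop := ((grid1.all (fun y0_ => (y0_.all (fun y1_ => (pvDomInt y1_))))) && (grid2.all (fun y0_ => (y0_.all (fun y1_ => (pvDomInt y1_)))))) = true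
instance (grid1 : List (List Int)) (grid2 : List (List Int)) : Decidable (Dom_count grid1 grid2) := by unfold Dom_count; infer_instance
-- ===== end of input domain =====

-- B replaces A's recursive DFS flood fill by an explicit stack-based flood fill (idiomatic,
-- same cost); both mutate grid2 identically in Python (every visited island cell is zeroed),
-- and the equivalence proved here is about the RETURN value.

-- number of cells equal to 1 in a row / in the grid (used as fuel / termination measure)
def countOnes : List Int → Nat
  | [] => 0
  | a :: t => (if a = 1 then 1 else 0) + countOnes t

def ones : List (List Int) → Nat
  | [] => 0
  | row :: t => countOnes row + ones t

-- grid cell read (defaults to 0 out of range; every Python access is guarded in range under Pre_)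
def getCell (g : List (List Int)) (i j : Nat) : Int := (g.getD i []).getD j 0

-- grid2[i][j] = 0
def setCell (g : List (List Int)) (i j : Nat) : List (List Int) :=
  g.set i ((g.getD i []).set j 0)

-- ===== PORT A =====
-- A's recursive dfs, transliterated with a fuel parameter for termination; count calls it
-- with fuel = ones g + 1, which is never exhausted because every recursive call happens
-- after a 1-cell was just zeroed.
def dfsA (g1 : List (List Int)) (r c : Nat) : Nat → Nat → Nat → List (List Int) → Bool × List (List Int)
  | 0, _, _, g => (true, g)
  | f+1, i, j, g =>
    if getCell g i j = 1 then
      let g0 := setCell g i j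
      let t := if 1 ≤ i then dfsA g1 r c f (i-1) j g0 else (true, g0)
      let b := if i + 1 < r then dfsA g1 r c f (i+1) j t.2 else (true, t.2)
      let l := if 1 ≤ j then dfsA g1 r c f i (j-1) b.2 else (true, b.2)
      let rt := if j + 1 < c then dfsA g1 r c f i (j+1) l.2 else (true, l.2)
      ((getCell g1 i j == 1) && t.1 && b.1 && l.1 && rt.1, rt.2)
    else (true, g)

def bodyA (grid1 : List (List Int)) (r c : Nat) (s : Int × List (List Int)) (i j : Nat) : Int × List (List Int) :=
  if getCell s.2 i j = 1 then
    let p := dfsA grid1 r c (ones s.2 + 1) i j s.2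
    (s.1 + (if p.1 then (1:Int) else 0), p.2)
  else s

def count (grid1 : List (List Int)) (grid2 : List (List Int)) : Int :=
  ((List.range grid1.length).foldl (fun s i =>
      (List.range (grid1.headD []).length).foldl
        (fun s j => bodyA grid1 grid1.length (grid1.headD []).length s i j) s)
    ((0:Int), grid2)).1

-- ===== PORT B =====
-- lemmas needed by loopB's decreasing_by
theorem countOnes_set (row : List Int) (j : Nat) :
    countOnes (row.set j 0) + (if row.getD j 0 = 1 then 1 else 0) = countOnes row := by
  induction row generalizing j with
  | nil => simp [countOnes]
  | cons a t ih =>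
    cases j with
    | zero =>
      simp only [List.set_cons_zero, List.getD_cons_zero, countOnes,
        if_neg (show ¬(0:Int) = 1 by decide)]
      omega
    | succ j =>
      simp only [List.set_cons_succ, List.getD_cons_succ, countOnes]
      have := ih j
      omega

theorem ones_setCell (g : List (List Int)) (i j : Nat) :
    ones (setCell g i j) + (if getCell g i j = 1 then 1 else 0) = ones g := by
  induction g generalizing i with
  | nil => simp [setCell, getCell, ones]
  | cons row t ih =>
    cases i with
    | zero =>
      have hset : setCell (row :: t) 0 j = row.set j 0 :: t := by simp [setCell]
      have hget : getCell (row :: t) 0 j = row.getD j 0 := by simp [getCell]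
      rw [hset, hget]
      simp only [ones]
      have := countOnes_set row j
      omega
    | succ i =>
      have hset : setCell (row :: t) (i+1) j = row :: setCell t i j := by simp [setCell]
      have hget : getCell (row :: t) (i+1) j = getCell t i j := by simp [getCell]
      rw [hset, hget]
      simp only [ones]
      have := ih i
      omega

theorem ones_setCell_lt (g : List (List Int)) (i j : Nat) (h : getCell g i j = 1) :
    ones (setCell g i j) < ones g := by
  have := ones_setCell g i j; rw [if_pos h] at this; omega

-- B's explicit stack flood fill: pop a cell, zero it, AND the all-land flag, push neighbours
def loopB (g1 : List (List Int)) (r c : Nat) : List (Int × Int) → List (List Int) → Bool → Bool × List (List Int)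
  | [], g, ok => (ok, g)
  | (x, y) :: rest, g, ok =>
    if h : 0 ≤ x ∧ x < (r:Int) ∧ 0 ≤ y ∧ y < (c:Int) ∧ getCell g x.toNat y.toNat = 1 then
      loopB g1 r c ((x-1,y) :: (x+1,y) :: (x,y-1) :: (x,y+1) :: rest)
        (setCell g x.toNat y.toNat) (ok && (getCell g1 x.toNat y.toNat == 1))
    else loopB g1 r c rest g ok
  termination_by stack g _ => 5 * ones g + stack.length
  decreasing_by
  · have := ones_setCell_lt g x.toNat y.toNat h.2.2.2.2
    simp only [List.length_cons]; omega
  · simp only [List.length_cons]; omega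

def bodyB (grid1 : List (List Int)) (r c : Nat) (s : Int × List (List Int)) (i j : Nat) : Int × List (List Int) :=
  if getCell s.2 i j = 1 then
    let p := loopB grid1 r c [((i:Int), (j:Int))] s.2 true
    (s.1 + (if p.1 then (1:Int) else 0), p.2)
  else s

def count_alt (grid1 : List (List Int)) (grid2 : List (List Int)) : Int :=
  ((List.range grid1.length).foldl (fun s i =>
      (List.range (grid1.headD []).length).foldl
        (fun s j => bodyB grid1 grid1.length (grid1.headD []).length s i j) s)
    ((0:Int), grid2)).1

-- ===== PRECONDITION & SPEC =====
-- Pre_ is exactly the inputs on which Python A returns (no exception): grid1 is non-empty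
-- (grid1[0] is read), every row of grid2 inside the r×c window is long enough for the window,
-- and wherever such a grid2 cell holds 1 the corresponding grid1 row is long enough
-- (grid1[i][j] is read exactly at the originally-1 window cells).
def Pre_count (grid1 : List (List Int)) (grid2 : List (List Int)) : Prop :=
  grid1 ≠ [] ∧
  ∀ i < grid1.length, ∀ j < (grid1.headD []).length,
    j < (grid2.getD i []).length ∧ ((grid2.getD i []).getD j 0 = 1 → j < (grid1.getD i []).length)
instance (grid1 : List (List Int)) (grid2 : List (List Int)) : Decidable (Pre_count grid1 grid2) := by
  unfold Pre_count; infer_instance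

def pvWitness_count : List (List Int) × List (List Int) :=
  ([[1, 0], [0, 1]], [[1, 1], [0, 0]])

def Spec_count (grid1 : List (List Int)) (grid2 : List (List Int)) (out : Int) : Prop := out = count_alt grid1 grid2
instance (grid1 : List (List Int)) (grid2 : List (List Int)) (out : Int) : Decidable (Spec_count grid1 grid2 out) := by unfold Spec_count; infer_instance

-- ===== CLAIM (what is proved, stated in full; the proofs are below) =====
def Claim_equal_count : Prop := ∀ (grid1 : List (List Int)) (grid2 : List (List Int)), Dom_count grid1 grid2 → Pre_count grid1 grid2 → Spec_count grid1 grid2 (count grid1 grid2)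

-- ===== LEMMAS AND PROOFS =====

theorem ones_setCell_le (g : List (List Int)) (i j : Nat) :
    ones (setCell g i j) ≤ ones g := by
  have := ones_setCell g i j; split at this <;> omega

theorem ones_pos (g : List (List Int)) (i j : Nat) (h : getCell g i j = 1) : 1 ≤ ones g := by
  have := ones_setCell g i j; rw [if_pos h] at this; omega

theorem ones_dfsA_le (g1 : List (List Int)) (r c : Nat) (f : Nat) :
    ∀ (i j : Nat) (g : List (List Int)), ones (dfsA g1 r c f i j g).2 ≤ ones g := by
  induction f with
  | zero => intro i j g; simp [dfsA]
  | succ f ih =>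
    intro i j g
    have H : ∀ (P : Prop) [Decidable P] (i' j' : Nat) (g' : List (List Int)),
        ones ((if P then dfsA g1 r c f i' j' g' else (true, g')).2) ≤ ones g' := by
      intro P _ i' j' g'; split
      · exact ih i' j' g'
      · simp
    by_cases h : getCell g i j = 1
    · simp only [dfsA, if_pos h]
      exact le_trans (H _ _ _ _) (le_trans (H _ _ _ _) (le_trans (H _ _ _ _)
        (le_trans (H _ _ _ _) (ones_setCell_le g i j))))
    · simp [dfsA, if_neg h]

-- fuel irrelevance: any fuel strictly above ones g computes the same result
theorem dfsA_fuel (g1 : List (List Int)) (r c : Nat) :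
    ∀ (n : Nat) (g : List (List Int)) (i j f f' : Nat), ones g ≤ n → ones g < f → ones g < f' →
      dfsA g1 r c f i j g = dfsA g1 r c f' i j g := by
  intro n
  induction n with
  | zero =>
    intro g i j f f' hn hf hf'
    obtain ⟨fa, rfl⟩ : ∃ fa, f = fa + 1 := ⟨f - 1, by omega⟩
    obtain ⟨fb, rfl⟩ : ∃ fb, f' = fb + 1 := ⟨f' - 1, by omega⟩
    by_cases h : getCell g i j = 1
    · exact absurd (ones_pos g i j h) (by omega)
    · simp [dfsA, if_neg h]
  | succ n ih =>
    intro g i j f f' hn hf hf'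
    obtain ⟨fa, rfl⟩ : ∃ fa, f = fa + 1 := ⟨f - 1, by omega⟩
    obtain ⟨fb, rfl⟩ : ∃ fb, f' = fb + 1 := ⟨f' - 1, by omega⟩
    by_cases h : getCell g i j = 1
    · have hg0 : ones (setCell g i j) + 1 = ones g := by
        have := ones_setCell g i j; rw [if_pos h] at this; omega
      have key : ∀ (P : Prop) [Decidable P] (i' j' : Nat) (g' : List (List Int)),
          ones g' < ones g →
          (if P then dfsA g1 r c fa i' j' g' else (true, g')) =
          (if P then dfsA g1 r c fb i' j' g' else (true, g')) := by
        intro P _ i' j' g' hlt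
        split
        · exact ih g' i' j' fa fb (by omega) (by omega) (by omega)
        · rfl
      have hle : ∀ (P : Prop) [Decidable P] (i' j' : Nat) (g' : List (List Int)),
          ones ((if P then dfsA g1 r c fb i' j' g' else (true, g')).2) ≤ ones g' := by
        intro P _ i' j' g'; split
        · exact ones_dfsA_le g1 r c fb i' j' g'
        · simp
      simp only [dfsA, if_pos h]
      rw [key _ _ _ _ (by omega)]
      rw [key _ _ _ _ (lt_of_le_of_lt (hle _ _ _ _) (by omega))]
      rw [key _ _ _ _ (lt_of_le_of_lt (le_trans (hle _ _ _ _) (hle _ _ _ _)) (by omega))]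
      rw [key _ _ _ _ (lt_of_le_of_lt (le_trans (hle _ _ _ _) (le_trans (hle _ _ _ _) (hle _ _ _ _))) (by omega))]
    · simp [dfsA, if_neg h]

-- A's dfs with its canonical (always sufficient) fuel
def dfsTop (g1 : List (List Int)) (r c : Nat) (i j : Nat) (g : List (List Int)) : Bool × List (List Int) :=
  dfsA g1 r c (ones g + 1) i j g

-- what one stack entry contributes: A's guarded dfs call
def stepB (g1 : List (List Int)) (r c : Nat) (x y : Int) (g : List (List Int)) : Bool × List (List Int) :=
  if 0 ≤ x ∧ x < (r:Int) ∧ 0 ≤ y ∧ y < (c:Int) then dfsTop g1 r c x.toNat y.toNat g else (true, g)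

theorem stepB_le (g1 : List (List Int)) (r c : Nat) (x y : Int) (g : List (List Int)) :
    ones (stepB g1 r c x y g).2 ≤ ones g := by
  unfold stepB; split
  · exact ones_dfsA_le g1 r c _ _ _ g
  · simp

theorem stepB_shift_up (g1 : List (List Int)) (r c F : Nat) (x y : Int) (g' : List (List Int))
    (h : 0 ≤ x ∧ x < (r:Int) ∧ 0 ≤ y ∧ y < (c:Int)) (hF : ones g' < F) :
    (if 1 ≤ x.toNat then dfsA g1 r c F (x.toNat - 1) y.toNat g' else (true, g')) =
    stepB g1 r c (x - 1) y g' := by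
  unfold stepB dfsTop
  by_cases hx : 1 ≤ x.toNat
  · rw [if_pos hx, if_pos (show 0 ≤ x - 1 ∧ x - 1 < (r:Int) ∧ 0 ≤ y ∧ y < (c:Int) by omega)]
    have h1 : (x - 1).toNat = x.toNat - 1 := by omega
    rw [h1]
    exact dfsA_fuel g1 r c (ones g') g' _ _ F (ones g' + 1) le_rfl hF (by omega)
  · rw [if_neg hx, if_neg (show ¬(0 ≤ x - 1 ∧ x - 1 < (r:Int) ∧ 0 ≤ y ∧ y < (c:Int)) by omega)]

theorem stepB_shift_down (g1 : List (List Int)) (r c F : Nat) (x y : Int) (g' : List (List Int))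
    (h : 0 ≤ x ∧ x < (r:Int) ∧ 0 ≤ y ∧ y < (c:Int)) (hF : ones g' < F) :
    (if x.toNat + 1 < r then dfsA g1 r c F (x.toNat + 1) y.toNat g' else (true, g')) =
    stepB g1 r c (x + 1) y g' := by
  unfold stepB dfsTop
  by_cases hx : x.toNat + 1 < r
  · rw [if_pos hx, if_pos (show 0 ≤ x + 1 ∧ x + 1 < (r:Int) ∧ 0 ≤ y ∧ y < (c:Int) by omega)]
    have h1 : (x + 1).toNat = x.toNat + 1 := by omega
    rw [h1]
    exact dfsA_fuel g1 r c (ones g') g' _ _ F (ones g' + 1) le_rfl hF (by omega)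
  · rw [if_neg hx, if_neg (show ¬(0 ≤ x + 1 ∧ x + 1 < (r:Int) ∧ 0 ≤ y ∧ y < (c:Int)) by omega)]

theorem stepB_shift_left (g1 : List (List Int)) (r c F : Nat) (x y : Int) (g' : List (List Int))
    (h : 0 ≤ x ∧ x < (r:Int) ∧ 0 ≤ y ∧ y < (c:Int)) (hF : ones g' < F) :
    (if 1 ≤ y.toNat then dfsA g1 r c F x.toNat (y.toNat - 1) g' else (true, g')) =
    stepB g1 r c x (y - 1) g' := by
  unfold stepB dfsTop
  by_cases hy : 1 ≤ y.toNat
  · rw [if_pos hy, if_pos (show 0 ≤ x ∧ x < (r:Int) ∧ 0 ≤ y - 1 ∧ y - 1 < (c:Int) by omega)]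
    have h1 : (y - 1).toNat = y.toNat - 1 := by omega
    rw [h1]
    exact dfsA_fuel g1 r c (ones g') g' _ _ F (ones g' + 1) le_rfl hF (by omega)
  · rw [if_neg hy, if_neg (show ¬(0 ≤ x ∧ x < (r:Int) ∧ 0 ≤ y - 1 ∧ y - 1 < (c:Int)) by omega)]

theorem stepB_shift_right (g1 : List (List Int)) (r c F : Nat) (x y : Int) (g' : List (List Int))
    (h : 0 ≤ x ∧ x < (r:Int) ∧ 0 ≤ y ∧ y < (c:Int)) (hF : ones g' < F) :
    (if y.toNat + 1 < c then dfsA g1 r c F x.toNat (y.toNat + 1) g' else (true, g')) =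
    stepB g1 r c x (y + 1) g' := by
  unfold stepB dfsTop
  by_cases hy : y.toNat + 1 < c
  · rw [if_pos hy, if_pos (show 0 ≤ x ∧ x < (r:Int) ∧ 0 ≤ y + 1 ∧ y + 1 < (c:Int) by omega)]
    have h1 : (y + 1).toNat = y.toNat + 1 := by omega
    rw [h1]
    exact dfsA_fuel g1 r c (ones g') g' _ _ F (ones g' + 1) le_rfl hF (by omega)
  · rw [if_neg hy, if_neg (show ¬(0 ≤ x ∧ x < (r:Int) ∧ 0 ≤ y + 1 ∧ y + 1 < (c:Int)) by omega)]

-- the stack-simulation lemma: popping one entry is exactly A's guarded dfs on that entry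
theorem loopB_cons (g1 : List (List Int)) (r c : Nat) :
    ∀ (n : Nat) (g : List (List Int)), ones g ≤ n →
      ∀ (x y : Int) (rest : List (Int × Int)) (ok : Bool),
        loopB g1 r c ((x, y) :: rest) g ok =
        loopB g1 r c rest (stepB g1 r c x y g).2 (ok && (stepB g1 r c x y g).1) := by
  intro n
  induction n with
  | zero =>
    intro g hn x y rest ok
    rw [loopB]
    split
    · rename_i h
      exact absurd (ones_pos g x.toNat y.toNat h.2.2.2.2) (by omega)
    · rename_i h
      unfold stepB
      split
      · rename_i hP
        have hc : ¬ getCell g x.toNat y.toNat = 1 := fun hc => h ⟨hP.1, hP.2.1, hP.2.2.1, hP.2.2.2, hc⟩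
        simp only [dfsTop, dfsA, if_neg hc, Bool.and_true]
      · simp
  | succ n ih =>
    intro g hn x y rest ok
    rw [loopB]
    split
    · rename_i h
      have hcell : getCell g x.toNat y.toNat = 1 := h.2.2.2.2
      have hg0 : ones (setCell g x.toNat y.toNat) + 1 = ones g := by
        have := ones_setCell g x.toNat y.toNat; rw [if_pos hcell] at this; omega
      have hP : 0 ≤ x ∧ x < (r:Int) ∧ 0 ≤ y ∧ y < (c:Int) := ⟨h.1, h.2.1, h.2.2.1, h.2.2.2.1⟩
      -- peel the four pushed neighbours with the induction hypothesis
      have l1 : ones (setCell g x.toNat y.toNat) ≤ n := by omega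
      have l2 : ones ((stepB g1 r c (x-1) y (setCell g x.toNat y.toNat)).2) ≤ n :=
        le_trans (stepB_le _ _ _ _ _ _) l1
      have l3 : ones ((stepB g1 r c (x+1) y ((stepB g1 r c (x-1) y (setCell g x.toNat y.toNat)).2)).2) ≤ n :=
        le_trans (stepB_le _ _ _ _ _ _) l2
      have l4 : ones ((stepB g1 r c x (y-1) ((stepB g1 r c (x+1) y ((stepB g1 r c (x-1) y (setCell g x.toNat y.toNat)).2)).2)).2) ≤ n :=
        le_trans (stepB_le _ _ _ _ _ _) l3
      rw [ih _ l1, ih _ l2, ih _ l3, ih _ l4]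
      -- compute stepB x y g into the same chain
      conv_rhs => rw [stepB, if_pos hP]
      simp only [dfsTop, dfsA, if_pos hcell]
      rw [stepB_shift_up g1 r c (ones g) x y _ hP (by omega)]
      rw [stepB_shift_down g1 r c (ones g) x y _ hP (lt_of_le_of_lt (stepB_le _ _ _ _ _ _) (by omega))]
      rw [stepB_shift_left g1 r c (ones g) x y _ hP
        (lt_of_le_of_lt (le_trans (stepB_le _ _ _ _ _ _) (stepB_le _ _ _ _ _ _)) (by omega))]
      rw [stepB_shift_right g1 r c (ones g) x y _ hP
        (lt_of_le_of_lt (le_trans (stepB_le _ _ _ _ _ _) (le_trans (stepB_le _ _ _ _ _ _) (stepB_le _ _ _ _ _ _))) (by omega))]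
      simp only [Bool.and_assoc]
    · rename_i h
      unfold stepB
      split
      · rename_i hP
        have hc : ¬ getCell g x.toNat y.toNat = 1 := fun hc => h ⟨hP.1, hP.2.1, hP.2.2.1, hP.2.2.2, hc⟩
        simp only [dfsTop, dfsA, if_neg hc, Bool.and_true]
      · simp

theorem foldl_congr_mem' {α β : Type} (l : List α) (f g : β → α → β) (b : β)
    (h : ∀ x ∈ l, ∀ s, f s x = g s x) : l.foldl f b = l.foldl g b := by
  induction l generalizing b with
  | nil => rfl
  | cons a t ih => simp only [List.foldl_cons, h a (by simp), ih _ (fun x hx s => h x (by simp [hx]) s)]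

theorem bodyA_eq_bodyB (grid1 : List (List Int)) (r c : Nat) (i j : Nat)
    (hi : i < r) (hj : j < c) (s : Int × List (List Int)) :
    bodyA grid1 r c s i j = bodyB grid1 r c s i j := by
  unfold bodyA bodyB
  split
  · rw [loopB_cons grid1 r c (ones s.2) s.2 le_rfl]
    rw [loopB]
    have hP : 0 ≤ (i:Int) ∧ (i:Int) < (r:Int) ∧ 0 ≤ (j:Int) ∧ (j:Int) < (c:Int) := by
      constructor; · exact Int.natCast_nonneg i
      constructor; · exact_mod_cast hi
      constructor; · exact Int.natCast_nonneg j
      · exact_mod_cast hj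
    rw [stepB, if_pos hP]
    simp [dfsTop, Int.toNat_natCast]
  · rfl

-- ===== VERDICT (by name: the statement is the Claim_ definition above) =====
theorem count_spec : Claim_equal_count := by
  intro grid1 grid2 _ _
  unfold Spec_count count count_alt
  congr 1
  apply foldl_congr_mem'
  intro i hi s
  apply foldl_congr_mem'
  intro j hj t
  exact bodyA_eq_bodyB grid1 grid1.length (grid1.headD []).length i j
    (List.mem_range.mp hi) (List.mem_range.mp hj) t
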